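-- pv_equiv track=rewrite | github.com/joshua530/dynamic_programming | count_allconstruct.py | count_allconstruct
-- ===== SOURCE A (Python) =====
-- from typing import List
--
-- def count_allconstruct(target: str, prefixes: List[str]):
--     """
--     Finds all possible substring combinations to
--     construct the target string
--     """
--     # base case
--     if target == "":
--         return [[]]
--
--     combinations = []
--
--     for prefix in prefixes:
--         if target.startswith(prefix):
--             len_prefix = len(prefix)
--             results = count_allconstruct(target[len_prefix:], prefixes)
--
--             if len(results) != 0:  # remaining substring matched
--                 for i in range(len(results)):
--                     results[i] = [prefix] + results[i]
--                 combinations += results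
--
--     return combinations
-- ===== SOURCE B (Python) =====
-- def count_allconstruct(target, prefixes):
--     # Bottom-up DP over suffix start positions (iterative table, no recursion).
--     n = len(target)
--     combos = [[] for _ in range(n + 1)]
--     combos[n] = [[]]
--     for i in range(n - 1, -1, -1):
--         for prefix in prefixes:
--             k = len(prefix)
--             if target.startswith(prefix, i) and combos[i + k]:
--                 combos[i] = combos[i] + [[prefix] + rest for rest in combos[i + k]]
--     return combos[0]
-- ===== Notes on version B (the rewrite author's own statement) =====
-- stated objective: alternative
-- what changed: Replaced A's top-down recursion over suffixes with an iterative bottom-up DP table combos[i] of all decompositions of target[i:], filled from i=n down to 0 and read off at combos[0].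
import Mathlib
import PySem

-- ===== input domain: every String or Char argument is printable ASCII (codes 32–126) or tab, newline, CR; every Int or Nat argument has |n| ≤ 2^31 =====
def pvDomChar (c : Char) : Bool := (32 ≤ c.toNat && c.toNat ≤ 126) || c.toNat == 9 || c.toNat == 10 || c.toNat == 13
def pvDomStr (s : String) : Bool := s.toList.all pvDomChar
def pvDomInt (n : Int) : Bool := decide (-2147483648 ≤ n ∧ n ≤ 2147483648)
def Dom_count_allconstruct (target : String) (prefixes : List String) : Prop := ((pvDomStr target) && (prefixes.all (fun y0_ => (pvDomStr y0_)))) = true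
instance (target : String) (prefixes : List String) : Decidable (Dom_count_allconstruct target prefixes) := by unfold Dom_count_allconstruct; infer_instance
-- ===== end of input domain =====

-- B replaces A's top-down recursion over suffixes by an iterative bottom-up DP table;
-- return values agree wherever A returns (A raises RecursionError when "" ∈ prefixes and target ≠ "").

-- ===== PORT A =====
-- A recurses on the target string; we work on its character list.
-- target.startswith(prefix) is List.isPrefixOf on the character lists (exact);
-- target[len_prefix:] with 0 ≤ len_prefix is List.drop (exact).
-- When prefix = "" and target ≠ "" Python A recurses forever (RecursionError, outside
-- Pre_); the inner `if hl` guard only makes the Lean recursion total there.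
def goA (prefixes : List String) (t : List Char) : List (List String) :=
  if h : t = [] then [[]]
  else
    prefixes.foldl (fun acc p =>
      if hp : p.toList.isPrefixOf t then
        if hl : p.toList.length = 0 then acc
        else
          let results := goA prefixes (t.drop p.toList.length)
          if results.length ≠ 0 then acc ++ results.map (fun r => p :: r) else acc
      else acc) []
termination_by t.length
decreasing_by
  have ht : 0 < t.length := List.length_pos_iff.mpr h
  simp only [List.length_drop]
  omega

def count_allconstruct (target : String) (prefixes : List String) : List (List String) :=
  goA prefixes target.toList

-- ===== PORT B =====
-- Source B's loop `for i in range(n-1, -1, -1)` building combos[i] from the already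
-- filled combos[i+1..n]: buildB t returns the table [combos[i], combos[i+1], …, combos[n]]
-- for the suffix t = target[i:]; one loop iteration = one `cons` step.
-- combos[i+k] (k = len(prefix) ≥ 1) is tab[k-1]; for k = 0 it is the entry being built (e).
def buildB (prefixes : List String) : List Char → List (List (List String))
  | [] => [[[]]]
  | c :: rest =>
    let tab := buildB prefixes rest
    let entry := prefixes.foldl (fun e p =>
      let k := p.toList.length
      let src := if k = 0 then e else tab.getD (k - 1) []
      if p.toList.isPrefixOf (c :: rest) ∧ src ≠ [] then
        e ++ src.map (fun r => p :: r)
      else e) []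
    entry :: tab

def count_allconstruct_alt (target : String) (prefixes : List String) : List (List String) :=
  (buildB prefixes target.toList).headD []

-- ===== PRECONDITION & SPEC =====
-- Pre_ excludes the inputs where prefixes contains "" while target ≠ "": there Python A
-- recurses forever and raises RecursionError, so it returns no value.
def Pre_count_allconstruct (target : String) (prefixes : List String) : Prop :=
  target = "" ∨ "" ∉ prefixes
instance (target : String) (prefixes : List String) : Decidable (Pre_count_allconstruct target prefixes) := by unfold Pre_count_allconstruct; infer_instance
def pvWitness_count_allconstruct : String × List String := ("ab", ["a", "b", "ab"])

def Spec_count_allconstruct (target : String) (prefixes : List String) (out : List (List String)) : Prop := out = count_allconstruct_alt target prefixes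
instance (target : String) (prefixes : List String) (out : List (List String)) : Decidable (Spec_count_allconstruct target prefixes out) := by unfold Spec_count_allconstruct; infer_instance

-- ===== CLAIM (what is proved, stated in full; the proofs are below) =====
def Claim_equal_count_allconstruct : Prop := ∀ (target : String) (prefixes : List String), Dom_count_allconstruct target prefixes → Pre_count_allconstruct target prefixes → Spec_count_allconstruct target prefixes (count_allconstruct target prefixes)

-- ===== LEMMAS AND PROOFS =====

lemma goA_nil (prefixes : List String) : goA prefixes [] = [[]] := by
  rw [goA]; rfl

lemma goA_cons (prefixes : List String) (c : Char) (rest : List Char) :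
    goA prefixes (c :: rest) = prefixes.foldl (fun acc p =>
      if hp : p.toList.isPrefixOf (c :: rest) then
        if hl : p.toList.length = 0 then acc
        else
          let results := goA prefixes ((c :: rest).drop p.toList.length)
          if results.length ≠ 0 then acc ++ results.map (fun r => p :: r) else acc
      else acc) [] := by
  rw [goA, dif_neg (List.cons_ne_nil c rest)]

-- the B-table indexed at j ≤ rest.length is goA of the corresponding suffix
lemma tails_map_getD (f : List Char → List (List String)) :
    ∀ (rest : List Char) (j : Nat), j ≤ rest.length →
      ((rest.tails).map f).getD j [] = f (rest.drop j) := by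
  intro rest
  induction rest with
  | nil =>
    intro j hj
    have hj0 : j = 0 := by simpa using hj
    subst hj0; simp
  | cons c r ih =>
    intro j hj
    cases j with
    | zero => simp
    | succ j' =>
      simp only [List.tails_cons, List.map_cons, List.getD_cons_succ, List.drop_succ_cons]
      exact ih j' (by simpa using hj)

-- one DP entry equals one unfolding of A's fold, prefix by prefix
lemma fold_entry_eq (prefixes : List String) (c : Char) (rest : List Char)
    (hne : "" ∉ prefixes) :
    ∀ (ps : List String) (acc : List (List String)), (∀ p ∈ ps, p ∈ prefixes) →
      ps.foldl (fun e p =>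
        let k := p.toList.length
        let src := if k = 0 then e else ((rest.tails).map (goA prefixes)).getD (k - 1) []
        if p.toList.isPrefixOf (c :: rest) ∧ src ≠ [] then
          e ++ src.map (fun r => p :: r)
        else e) acc
      =
      ps.foldl (fun acc p =>
        if hp : p.toList.isPrefixOf (c :: rest) then
          if hl : p.toList.length = 0 then acc
          else
            let results := goA prefixes ((c :: rest).drop p.toList.length)
            if results.length ≠ 0 then acc ++ results.map (fun r => p :: r) else acc
        else acc) acc := by
  intro ps
  induction ps with
  | nil => intro acc _; rfl
  | cons p ps ih =>
    intro acc hmem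
    simp only [List.foldl_cons]
    have hpmem : p ∈ prefixes := hmem p (List.mem_cons_self)
    have hpne : p ≠ "" := fun h => hne (h ▸ hpmem)
    have hk0 : p.toList.length ≠ 0 := by
      intro h
      exact hpne (by
        have : p.toList = [] := List.length_eq_zero_iff.mp h
        cases p; simp_all [String.toList])
    have hstep :
        (let k := p.toList.length
         let src := if k = 0 then acc else ((rest.tails).map (goA prefixes)).getD (k - 1) []
         if p.toList.isPrefixOf (c :: rest) ∧ src ≠ [] then
           acc ++ src.map (fun r => p :: r)
         else acc)
        =
        (if hp : p.toList.isPrefixOf (c :: rest) then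
          if hl : p.toList.length = 0 then acc
          else
            let results := goA prefixes ((c :: rest).drop p.toList.length)
            if results.length ≠ 0 then acc ++ results.map (fun r => p :: r) else acc
        else acc) := by
      by_cases hp : p.toList.isPrefixOf (c :: rest)
      · have hplen : p.toList.length ≤ (c :: rest).length :=
          (List.isPrefixOf_iff_prefix.mp hp).length_le
        have hplen' : p.toList.length ≤ rest.length + 1 := by
          simpa only [List.length_cons] using hplen
        have hsrc : (if p.toList.length = 0 then acc
            else ((rest.tails).map (goA prefixes)).getD (p.toList.length - 1) [])
            = goA prefixes ((c :: rest).drop p.toList.length) := by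
          rw [if_neg hk0]
          rw [tails_map_getD (goA prefixes) rest (p.toList.length - 1) (by omega)]
          congr 1
          obtain ⟨k, hk⟩ : ∃ k, p.toList.length = k + 1 :=
            ⟨p.toList.length - 1, by omega⟩
          simp [hk]
        simp only [hsrc]
        rw [dif_pos hp, dif_neg hk0]
        by_cases hres : goA prefixes ((c :: rest).drop p.toList.length) = []
        · simp [hp]
        · have hlen : (goA prefixes ((c :: rest).drop p.toList.length)).length ≠ 0 := by
            simpa [List.length_eq_zero_iff] using hres
          simp [hp]
      · simp [hp]
    rw [hstep]
    exact ih _ (fun q hq => hmem q (List.mem_cons_of_mem _ hq))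

-- the whole table equals goA on every suffix
lemma buildB_eq_tails (prefixes : List String) (hne : "" ∉ prefixes) :
    ∀ (t : List Char), buildB prefixes t = (t.tails).map (goA prefixes) := by
  intro t
  induction t with
  | nil => simp [buildB, goA_nil]
  | cons c rest ih =>
    show (prefixes.foldl (fun e p =>
        let k := p.toList.length
        let src := if k = 0 then e else (buildB prefixes rest).getD (k - 1) []
        if p.toList.isPrefixOf (c :: rest) ∧ src ≠ [] then
          e ++ src.map (fun r => p :: r)
        else e) []) :: buildB prefixes rest
      = ((c :: rest).tails).map (goA prefixes)
    rw [List.tails_cons, List.map_cons, ih]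
    congr 1
    rw [goA_cons]
    exact fold_entry_eq prefixes c rest hne prefixes [] (fun _ h => h)

-- ===== VERDICT (by name: the statement is the Claim_ definition above) =====
theorem count_allconstruct_spec : Claim_equal_count_allconstruct := by
  intro target prefixes _ hpre
  show count_allconstruct target prefixes = count_allconstruct_alt target prefixes
  rcases hpre with htgt | hne
  · subst htgt
    show goA prefixes [] = (buildB prefixes []).headD []
    rw [goA_nil]; rfl
  · unfold count_allconstruct count_allconstruct_alt
    rw [buildB_eq_tails prefixes hne target.toList]
    cases h : target.toList with
    | nil => simp [goA_nil]
    | cons c rest => simp
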